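-- pv_equiv track=rewrite | github.com/vengadesh-max/Math-Routing-Agent | guardrails/input_guardrails.py | _detect_math_topic
-- ===== SOURCE A (Python) =====
-- def _detect_math_topic(text: str) -> str:
--     """Detect specific mathematical topic"""
--     text_lower = text.lower()
--
--     topic_keywords = {
--         "algebra": ["equation", "variable", "solve", "factor", "polynomial"],
--         "calculus": ["derivative", "integral", "limit", "differentiate", "integrate"],
--         "geometry": ["triangle", "circle", "angle", "area", "perimeter", "volume"],
--         "trigonometry": ["sin", "cos", "tan", "angle", "trigonometric"],
--         "statistics": ["mean", "median", "mode", "probability", "distribution"],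
--         "linear_algebra": ["matrix", "vector", "determinant", "eigenvalue"]
--     }
--
--     topic_scores = {}
--     for topic, keywords in topic_keywords.items():
--         score = sum(1 for keyword in keywords if keyword in text_lower)
--         topic_scores[topic] = score
--
--     if topic_scores:
--         return max(topic_scores, key=topic_scores.get)
--
--     return "general"
-- ===== SOURCE B (Python) =====
-- def _detect_math_topic(text: str) -> str:
--     """Detect specific mathematical topic"""
--     text_lower = text.lower()
--
--     topic_keywords = {
--         "algebra": ["equation", "variable", "solve", "factor", "polynomial"],
--         "calculus": ["derivative", "integral", "limit", "differentiate", "integrate"],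
--         "geometry": ["triangle", "circle", "angle", "area", "perimeter", "volume"],
--         "trigonometry": ["sin", "cos", "tan", "angle", "trigonometric"],
--         "statistics": ["mean", "median", "mode", "probability", "distribution"],
--         "linear_algebra": ["matrix", "vector", "determinant", "eigenvalue"]
--     }
--
--     # Counting-sort selection instead of a max scan: bucket each topic under its
--     # score, then take the first topic of the highest non-empty bucket (ties keep
--     # dict order, which is exactly max()'s first-occurrence rule).
--     buckets = [[] for _ in range(7)]  # no topic has more than 6 keywords
--     for topic, keywords in topic_keywords.items():
--         score = sum(1 for keyword in keywords if keyword in text_lower)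
--         buckets[score].append(topic)
--     for bucket in reversed(buckets):
--         if bucket:
--             return bucket[0]
-- ===== Notes on version B (the rewrite author's own statement) =====
-- stated objective: alternative
-- what changed: Replaces the score-dict plus max(key=get) scan by a counting-sort selection: topics are dropped into score buckets (scores are bounded by 6) and the answer is the first topic of the highest non-empty bucket, which reproduces max's first-occurrence tie-break without ever comparing scores.
import Mathlib
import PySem

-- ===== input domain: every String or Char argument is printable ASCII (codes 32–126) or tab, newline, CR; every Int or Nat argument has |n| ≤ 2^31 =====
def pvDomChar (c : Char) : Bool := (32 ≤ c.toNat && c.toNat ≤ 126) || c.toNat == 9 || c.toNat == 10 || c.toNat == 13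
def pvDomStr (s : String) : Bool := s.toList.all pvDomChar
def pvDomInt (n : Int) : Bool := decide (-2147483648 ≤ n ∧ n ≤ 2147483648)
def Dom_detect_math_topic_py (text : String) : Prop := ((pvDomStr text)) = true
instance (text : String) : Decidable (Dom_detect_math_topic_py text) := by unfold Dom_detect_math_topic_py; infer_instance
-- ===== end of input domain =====

-- B replaces A's score-dict + max(key=get) scan by a counting-sort bucket selection (first topic of the highest nonempty score bucket); same cost, different algorithm.


-- ===== PORT A =====
-- the topic_keywords literal (shared data, used verbatim by both Pythons)
def pvTopicKeywords : List (String × List String) :=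
  [("algebra", ["equation", "variable", "solve", "factor", "polynomial"]),
   ("calculus", ["derivative", "integral", "limit", "differentiate", "integrate"]),
   ("geometry", ["triangle", "circle", "angle", "area", "perimeter", "volume"]),
   ("trigonometry", ["sin", "cos", "tan", "angle", "trigonometric"]),
   ("statistics", ["mean", "median", "mode", "probability", "distribution"]),
   ("linear_algebra", ["matrix", "vector", "determinant", "eigenvalue"])]

def detect_math_topic_py (text : String) : String :=
  let text_lower := PySem.Str.lower text
  let topic_scores : PySem.Dict String Int :=
    pvTopicKeywords.foldl
      (fun d p =>
        d.insert p.1 ((p.2.map (fun kw => if PySem.Str.isIn kw text_lower then (1 : Int) else 0)).sum))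
      PySem.Dict.empty
  if topic_scores.size ≠ 0 then
    -- max(topic_scores, key=topic_scores.get): first key attaining the max score
    match PySem.List.max? topic_scores.keys (fun t => topic_scores.getD t 0) with
    | some t => t
    | none => "general"   -- unreachable inside this branch (keys nonempty)
  else "general"

-- ===== PORT B =====
-- 'for bucket in reversed(buckets): if bucket: return bucket[0]' — falling off the
-- end (Python: implicit None) is unreachable, since all six topics sit in some bucket
def pvPick : List (List String) → String
  | [] => ""
  | [] :: rest => pvPick rest
  | (t :: _) :: _ => t

def detect_math_topic_py_alt (text : String) : String :=
  let text_lower := PySem.Str.lower text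
  let buckets : List (List String) :=
    pvTopicKeywords.foldl
      (fun bs p =>
        let score := p.2.countP (fun kw => PySem.Str.isIn kw text_lower)
        -- buckets[score].append(topic); score ≤ 6 < 7 so the index is always valid
        bs.set score (bs.getD score [] ++ [p.1]))
      (List.replicate 7 [])
  pvPick buckets.reverse

-- ===== PRECONDITION & SPEC =====
def Spec_detect_math_topic_py (text : String) (out : String) : Prop := out = detect_math_topic_py_alt text
instance (text : String) (out : String) : Decidable (Spec_detect_math_topic_py text out) := by unfold Spec_detect_math_topic_py; infer_instance

-- ===== CLAIM (what is proved, stated in full; the proofs are below) =====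
def Claim_equal_detect_math_topic_py : Prop := ∀ (text : String), Dom_detect_math_topic_py text → Spec_detect_math_topic_py text (detect_math_topic_py text)

-- ===== LEMMAS AND PROOFS =====
-- (everything below is proof machinery only)

-- the cast (String × Nat) → (String × Int)
def pvCastP (q : String × Nat) : String × Int := (q.1, (q.2 : Int))
-- the running-first-max step (proof-side abstraction of max's first-occurrence rule)
def pvStepN (bb p : String × Nat) : String × Nat := if bb.2 < p.2 then p else bb
def pvStepI (bb p : String × Int) : String × Int := if bb.2 < p.2 then p else bb
-- the bucket-filling step of B
def pvBStep (bs : List (List String)) (p : String × Nat) : List (List String) :=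
  bs.set p.2 (bs.getD p.2 [] ++ [p.1])

-- invariant: max?'s first-max fold with the current leader b.1 in front tracks the strict-> pair
lemma maxfold_pair (g : String → Int) (P : List (String × Int))
    (hg : ∀ p ∈ P, g p.1 = p.2) (b : String × Int) (hb : b.2 = g b.1) :
    PySem.List.max? (b.1 :: P.map Prod.fst) g
      = some (P.foldl (fun bb p => if bb.2 < p.2 then p else bb) b).1 := by
  induction P generalizing b with
  | nil => simp [PySem.List.max?]
  | cons p P ih =>
    have hpg : g p.1 = p.2 := hg p (by simp)
    have hg' : ∀ q ∈ P, g q.1 = q.2 := fun q hq => hg q (by simp [hq])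
    have h1 := ih hg'
    simp only [PySem.List.max?, List.map_cons, List.foldl_cons] at h1 ⊢
    by_cases h : b.2 < p.2
    · rw [if_pos (by rw [← hb, hpg]; exact h), if_pos h]
      exact h1 p hpg.symm
    · rw [if_neg (by rw [← hb, hpg]; exact h), if_neg h]
      exact h1 b hb

-- A's max(keys, key=get) over an association list with nonnegative scores is a first-max fold
lemma max?_eq_fold (g : String → Int) (P : List (String × Int))
    (hg : ∀ p ∈ P, g p.1 = p.2) (hpos : ∀ p ∈ P, 0 ≤ p.2) (hne : P ≠ []) :
    PySem.List.max? (P.map Prod.fst) g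
      = some (P.foldl (fun bb p => if bb.2 < p.2 then p else bb) ("general", -1)).1 := by
  cases P with
  | nil => exact absurd rfl hne
  | cons p P =>
    have hpg : g p.1 = p.2 := hg p (by simp)
    have hg' : ∀ q ∈ P, g q.1 = q.2 := fun q hq => hg q (by simp [hq])
    have hp0 : (0 : Int) ≤ p.2 := hpos p (by simp)
    rw [List.map_cons, List.foldl_cons, if_pos (by omega : (-1 : Int) < p.2)]
    exact maxfold_pair g P hg' p hpg.symm

-- the six (topic, score) pairs as an association list
def L6 (a1 a2 a3 a4 a5 a6 : Int) : List (String × Int) :=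
  [("algebra",a1),("calculus",a2),("geometry",a3),("trigonometry",a4),("statistics",a5),("linear_algebra",a6)]

-- A's whole dict-then-max computation, abstracted over the six scores, equals a first-max fold over L6
lemma pv_six (a1 a2 a3 a4 a5 a6 : Int)
    (h1 : 0 ≤ a1) (h2 : 0 ≤ a2) (h3 : 0 ≤ a3) (h4 : 0 ≤ a4) (h5 : 0 ≤ a5) (h6 : 0 ≤ a6) :
    (let d : PySem.Dict String Int :=
        (((((PySem.Dict.empty.insert "algebra" a1).insert "calculus" a2).insert "geometry" a3).insert "trigonometry" a4).insert "statistics" a5).insert "linear_algebra" a6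
     if d.size ≠ 0 then
       match PySem.List.max? d.keys (fun t => d.getD t 0) with
       | some t => t
       | none => "general"
     else "general")
    = ((L6 a1 a2 a3 a4 a5 a6).foldl (fun bb p => if bb.2 < p.2 then p else bb) ("general", -1)).1 := by
  have hd : ((((((PySem.Dict.empty.insert "algebra" a1).insert "calculus" a2).insert "geometry" a3).insert "trigonometry" a4).insert "statistics" a5).insert "linear_algebra" a6 : PySem.Dict String Int)
      = PySem.Dict.mk (L6 a1 a2 a3 a4 a5 a6) := by
    apply PySem.Dict.ext
    simp [PySem.Dict.insert, PySem.Dict.contains, PySem.Dict.empty, L6]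
  simp only [hd]
  have hkeys : (PySem.Dict.mk (L6 a1 a2 a3 a4 a5 a6)).keys = (L6 a1 a2 a3 a4 a5 a6).map Prod.fst := by
    simp [PySem.Dict.keys]
  have hg : ∀ p ∈ L6 a1 a2 a3 a4 a5 a6, (PySem.Dict.mk (L6 a1 a2 a3 a4 a5 a6)).getD p.1 0 = p.2 := by
    intro p hp
    simp only [L6, List.mem_cons, List.not_mem_nil, or_false] at hp
    rcases hp with rfl|rfl|rfl|rfl|rfl|rfl <;>
      simp [PySem.Dict.getD, PySem.Dict.get?_mk_cons, L6]
  have hpos : ∀ p ∈ L6 a1 a2 a3 a4 a5 a6, (0:Int) ≤ p.2 := by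
    intro p hp
    simp only [L6, List.mem_cons, List.not_mem_nil, or_false] at hp
    rcases hp with rfl|rfl|rfl|rfl|rfl|rfl <;> assumption
  have hne : L6 a1 a2 a3 a4 a5 a6 ≠ [] := by simp [L6]
  have hsz : (PySem.Dict.mk (L6 a1 a2 a3 a4 a5 a6)).size ≠ 0 := by
    simp [PySem.Dict.size, L6]
  rw [if_pos hsz, hkeys, max?_eq_fold _ _ hg hpos hne]

-- the Int-valued first-max fold over casts is the cast of the Nat-valued one
lemma fold_cast (P : List (String × Nat)) (b : String × Nat) :
    (P.map pvCastP).foldl pvStepI (pvCastP b) = pvCastP (P.foldl pvStepN b) := by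
  induction P generalizing b with
  | nil => rfl
  | cons p P ih =>
    simp only [List.map_cons, List.foldl_cons]
    have : pvStepI (pvCastP b) (pvCastP p) = pvCastP (pvStepN b p) := by
      simp only [pvStepI, pvStepN, pvCastP]
      by_cases h : b.2 < p.2
      · rw [if_pos (by exact_mod_cast h), if_pos h]
      · rw [if_neg (by exact_mod_cast h), if_neg h]
    rw [this, ih]

-- every score in b :: P is at most the fold's score
lemma le_fold (P : List (String × Nat)) (b : String × Nat) :
    ∀ q ∈ b :: P, q.2 ≤ (P.foldl pvStepN b).2 := by
  induction P generalizing b with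
  | nil => intro q hq; simp at hq; subst hq; rfl
  | cons p P ih =>
    intro q hq
    have hb : b.2 ≤ (pvStepN b p).2 := by simp only [pvStepN]; split <;> omega
    have hp : p.2 ≤ (pvStepN b p).2 := by simp only [pvStepN]; split <;> omega
    have hstep : (pvStepN b p).2 ≤ ((p :: P).foldl pvStepN b).2 :=
      ih (pvStepN b p) (pvStepN b p) (by simp)
    rcases List.mem_cons.1 hq with rfl | hq'
    · exact le_trans hb hstep
    · rcases List.mem_cons.1 hq' with rfl | hq''
      · exact le_trans hp hstep
      · exact ih (pvStepN b p) q (List.mem_cons_of_mem _ hq'')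

-- the fold's result is one of the pairs
lemma mem_fold (P : List (String × Nat)) (b : String × Nat) :
    P.foldl pvStepN b ∈ b :: P := by
  induction P generalizing b with
  | nil => simp
  | cons p P ih =>
    have h := ih (pvStepN b p)
    simp only [List.foldl_cons]
    rcases List.mem_cons.1 h with h' | h'
    · rw [h']
      simp only [pvStepN]
      split <;> simp
    · simp [h']

-- the fold picks the FIRST pair attaining the maximal score
lemma find?_fold (P : List (String × Nat)) (b : String × Nat) :
    (b :: P).find? (fun q => decide ((P.foldl pvStepN b).2 ≤ q.2)) = some (P.foldl pvStepN b) := by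
  induction P generalizing b with
  | nil => simp
  | cons p P ih =>
    simp only [List.foldl_cons]
    by_cases h : b.2 < p.2
    · have hbp : pvStepN b p = p := by simp [pvStepN, h]
      simp only [hbp]
      have hple : p.2 ≤ (P.foldl pvStepN p).2 := le_fold P p p (by simp)
      rw [List.find?_cons_of_neg (by simp; omega)]
      exact ih p
    · have hbp : pvStepN b p = b := by simp [pvStepN, h]
      simp only [hbp]
      have hIH := ih b
      by_cases hb : (P.foldl pvStepN b).2 ≤ b.2
      · have hr : P.foldl pvStepN b = b := by
          rw [List.find?_cons_of_pos (by simpa using hb)] at hIH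
          exact (Option.some_inj.1 hIH).symm
        rw [List.find?_cons_of_pos (by simp [hr])]
        rw [hr]
      · have hble : b.2 ≤ (P.foldl pvStepN b).2 := le_fold P b b (by simp)
        have hp' : ¬ ((P.foldl pvStepN b).2 ≤ p.2) := by omega
        rw [List.find?_cons_of_neg (by simpa using hb)] at hIH
        rw [List.find?_cons_of_neg (by simpa using hb),
            List.find?_cons_of_neg (by simpa using hp')]
        exact hIH

-- invariant of B's bucket-filling fold: bucket s holds exactly the topics of score s, in order
lemma buckets_inv (P : List (String × Nat)) (bs : List (List String))
    (hP : ∀ p ∈ P, p.2 < bs.length) :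
    (P.foldl pvBStep bs).length = bs.length ∧
    ∀ s, (P.foldl pvBStep bs).getD s [] =
      bs.getD s [] ++ (P.filter (fun p => decide (p.2 = s))).map Prod.fst := by
  induction P generalizing bs with
  | nil => simp
  | cons p P ih =>
    have hlen : (pvBStep bs p).length = bs.length := by simp [pvBStep]
    have hP' : ∀ q ∈ P, q.2 < (pvBStep bs p).length := by
      intro q hq; rw [hlen]; exact hP q (by simp [hq])
    obtain ⟨ih1, ih2⟩ := ih (pvBStep bs p) hP'
    constructor
    · simp only [List.foldl_cons]; rw [ih1, hlen]
    · intro s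
      simp only [List.foldl_cons]
      rw [ih2 s]
      have hbs : (pvBStep bs p).getD s [] =
          bs.getD s [] ++ (if p.2 = s then [p.1] else []) := by
        simp only [pvBStep, List.getD]
        by_cases hs : p.2 = s
        · subst hs
          rw [List.getElem?_set_self (hP p (by simp))]
          simp
        · rw [List.getElem?_set_ne hs]
          simp [hs]
      have hflt : (p :: P).filter (fun q => decide (q.2 = s))
          = (if p.2 = s then [p] else []) ++ P.filter (fun q => decide (q.2 = s)) := by
        by_cases hs : p.2 = s <;> simp [hs]
      rw [hbs, hflt]
      by_cases hs : p.2 = s <;> simp [hs]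

-- pvPick scans the buckets top-down: on a strictly descending index list it returns the
-- head of bucket M when every bucket above M is empty and bucket M is not
lemma pick_first (g : Nat → List String) (M : Nat) (l : List Nat)
    (hpw : l.Pairwise (fun a b => b < a)) (hM : M ∈ l)
    (hempty : ∀ s, M < s → g s = []) (hne : g M ≠ []) :
    pvPick (l.map g) = (g M).headD "" := by
  induction l with
  | nil => simp at hM
  | cons s rest ih =>
    rcases List.mem_cons.1 hM with rfl | hM'
    · obtain ⟨t, ts, ht⟩ : ∃ t ts, g M = t :: ts := by
        cases h : g M with
        | nil => exact absurd h hne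
        | cons t ts => exact ⟨t, ts, rfl⟩
      simp [ht, pvPick]
    · have hlt : M < s := (List.pairwise_cons.1 hpw).1 M hM'
      rw [List.map_cons, hempty s hlt]
      exact ih (List.pairwise_cons.1 hpw).2 hM'

-- a list of length 7 reversed, written through getD
lemma reverse_of_length_seven (l : List (List String)) (h : l.length = 7) :
    l.reverse = [l.getD 6 [], l.getD 5 [], l.getD 4 [], l.getD 3 [],
                 l.getD 2 [], l.getD 1 [], l.getD 0 []] := by
  rcases l with _|⟨x0,_|⟨x1,_|⟨x2,_|⟨x3,_|⟨x4,_|⟨x5,_|⟨x6,_|⟨x7,l⟩⟩⟩⟩⟩⟩⟩⟩ <;>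
    simp only [List.length_cons, List.length_nil] at h <;>
    first
      | omega
      | simp [List.getD]

-- ===== VERDICT (by name: the statement is the Claim_ definition above) =====
set_option maxHeartbeats 1000000 in
theorem detect_math_topic_py_spec : Claim_equal_detect_math_topic_py := by
  intro text _
  unfold Spec_detect_math_topic_py
  -- abbreviations: the lowered text and the six Nat scores
  have hs : ∀ kws : List String,
      ((kws.map (fun kw => if PySem.Str.isIn kw (PySem.Str.lower text) then (1:Int) else 0)).sum)
        = ((kws.countP (fun kw => PySem.Str.isIn kw (PySem.Str.lower text))) : Int) := by
    intro kws; rw [PySem.List.sum_map_ite_one_zero]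
  have hpos : ∀ kws : List String,
      (0:Int) ≤ ((kws.map (fun kw => if PySem.Str.isIn kw (PySem.Str.lower text) then (1:Int) else 0)).sum) := by
    intro kws; rw [hs]; exact Int.natCast_nonneg _
  -- A's value is the Int first-max fold over the six (topic, score) pairs
  have hA := pv_six _ _ _ _ _ _
    (hpos ["equation", "variable", "solve", "factor", "polynomial"])
    (hpos ["derivative", "integral", "limit", "differentiate", "integrate"])
    (hpos ["triangle", "circle", "angle", "area", "perimeter", "volume"])
    (hpos ["sin", "cos", "tan", "angle", "trigonometric"])
    (hpos ["mean", "median", "mode", "probability", "distribution"])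
    (hpos ["matrix", "vector", "determinant", "eigenvalue"])
  refine hA.trans ?_
  rw [hs, hs, hs, hs, hs, hs]
  -- name the six scores and the scored association list (Nat side)
  set cnt : List String → Nat := fun kws => kws.countP (fun kw => PySem.Str.isIn kw (PySem.Str.lower text)) with hcnt
  set n1 : String × Nat := ("algebra", cnt ["equation", "variable", "solve", "factor", "polynomial"]) with hn1
  set rest : List (String × Nat) :=
    [("calculus", cnt ["derivative", "integral", "limit", "differentiate", "integrate"]),
     ("geometry", cnt ["triangle", "circle", "angle", "area", "perimeter", "volume"]),
     ("trigonometry", cnt ["sin", "cos", "tan", "angle", "trigonometric"]),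
     ("statistics", cnt ["mean", "median", "mode", "probability", "distribution"]),
     ("linear_algebra", cnt ["matrix", "vector", "determinant", "eigenvalue"])] with hrest
  set N : List (String × Nat) := n1 :: rest with hN
  set r : String × Nat := rest.foldl pvStepN n1 with hr
  -- LHS: the Int fold over L6 of the cast scores is the cast of the Nat fold
  have hL6 : L6 ((cnt ["equation", "variable", "solve", "factor", "polynomial"] : Nat) : Int)
      (cnt ["derivative", "integral", "limit", "differentiate", "integrate"])
      (cnt ["triangle", "circle", "angle", "area", "perimeter", "volume"])
      (cnt ["sin", "cos", "tan", "angle", "trigonometric"])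
      (cnt ["mean", "median", "mode", "probability", "distribution"])
      (cnt ["matrix", "vector", "determinant", "eigenvalue"])
      = pvCastP n1 :: rest.map pvCastP := by
    simp [L6, pvCastP, hn1, hrest]
  have hLHS : ((L6 ((cnt ["equation", "variable", "solve", "factor", "polynomial"] : Nat) : Int)
      (cnt ["derivative", "integral", "limit", "differentiate", "integrate"])
      (cnt ["triangle", "circle", "angle", "area", "perimeter", "volume"])
      (cnt ["sin", "cos", "tan", "angle", "trigonometric"])
      (cnt ["mean", "median", "mode", "probability", "distribution"])
      (cnt ["matrix", "vector", "determinant", "eigenvalue"])).foldl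
        (fun bb p => if bb.2 < p.2 then p else bb) ("general", -1)).1 = r.1 := by
    rw [hL6, List.foldl_cons]
    have h1 : (if (("general", (-1:Int)) : String × Int).2 < (pvCastP n1).2 then pvCastP n1 else ("general", -1))
        = pvCastP n1 := by
      rw [if_pos]
      show (-1 : Int) < (n1.2 : Int)
      have : (0:Int) ≤ (n1.2 : Int) := Int.natCast_nonneg _
      omega
    rw [h1]
    have hcast := fold_cast rest n1
    show (List.foldl pvStepI (pvCastP n1) (rest.map pvCastP)).1 = r.1
    rw [hcast, ← hr]
    simp [pvCastP]
  rw [hLHS]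
  -- RHS: B's bucket selection also returns r.1
  -- first, B's fold over pvTopicKeywords is the pvBStep fold over the scored list N
  have hBfold : detect_math_topic_py_alt text = pvPick ((N.foldl pvBStep (List.replicate 7 [])).reverse) := by
    simp only [detect_math_topic_py_alt, hN, hn1, hrest, pvTopicKeywords, List.foldl_cons,
      List.foldl_nil, pvBStep, hcnt]
  rw [hBfold]
  -- scores are at most 6
  have hscore : ∀ p ∈ N, p.2 < 7 := by
    intro p hp
    have hle : ∀ kws : List String, kws.length ≤ 6 → cnt kws < 7 := by
      intro kws hk
      have := List.countP_le_length (l := kws) (p := fun kw => PySem.Str.isIn kw (PySem.Str.lower text))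
      simp only [hcnt]
      omega
    simp only [hN, hn1, hrest, List.mem_cons, List.not_mem_nil, or_false] at hp
    rcases hp with rfl|rfl|rfl|rfl|rfl|rfl <;> exact hle _ (by simp)
  obtain ⟨hblen, hbget⟩ := buckets_inv N (List.replicate 7 []) (by simpa using hscore)
  -- name the bucket contents
  set g : Nat → List String := fun s => (N.filter (fun p => decide (p.2 = s))).map Prod.fst with hg
  have hget : ∀ s, (N.foldl pvBStep (List.replicate 7 [])).getD s [] = g s := by
    intro s
    rw [hbget s]
    have hrep : (List.replicate 7 ([] : List String)).getD s [] = [] := by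
      unfold List.getD
      rcases Nat.lt_or_ge s 7 with h | h
      · rw [List.getElem?_replicate]; simp [h]
      · rw [List.getElem?_eq_none (by simpa using h)]; rfl
    rw [hrep, List.nil_append, hg]
  have hrev : (N.foldl pvBStep (List.replicate 7 [])).reverse
      = [6,5,4,3,2,1,0].map g := by
    rw [reverse_of_length_seven _ (hblen.trans (by simp)),
        hget 6, hget 5, hget 4, hget 3, hget 2, hget 1, hget 0]
    rfl
  rw [hrev]
  -- facts about r
  have hrmem : r ∈ N := by rw [hr, hN]; exact mem_fold rest n1
  have hrle : ∀ q ∈ N, q.2 ≤ r.2 := by rw [hr, hN]; exact le_fold rest n1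
  have hr7 : r.2 < 7 := hscore r hrmem
  -- apply pick_first at M = r.2
  have hpick : pvPick ([6,5,4,3,2,1,0].map g) = (g r.2).headD "" := by
    apply pick_first
    · decide
    · have : r.2 ≤ 6 := by omega
      interval_cases h : r.2 <;> simp
    · intro s hsgt
      simp only [hg, List.map_eq_nil_iff, List.filter_eq_nil_iff]
      intro p hp
      have := hrle p hp
      simp; omega
    · simp only [hg, ne_eq, List.map_eq_nil_iff, List.filter_eq_nil_iff]
      intro h
      exact absurd (by simp) (h r hrmem)
  rw [hpick]
  -- the head of bucket r.2 is r.1: it is find? of the ≤-predicate, which find?_fold names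
  have hfilter : N.filter (fun p => decide (p.2 = r.2)) = N.filter (fun p => decide (r.2 ≤ p.2)) := by
    apply List.filter_congr
    intro p hp
    have := hrle p hp
    simp only [decide_eq_decide]
    omega
  have hfind : N.find? (fun q => decide (r.2 ≤ q.2)) = some r := by
    rw [hN, hr]
    exact find?_fold rest n1
  simp only [hg]
  rw [hfilter]
  rw [← List.head?_filter] at hfind
  cases hflt : N.filter (fun p => decide (r.2 ≤ p.2)) with
  | nil => rw [hflt] at hfind; simp at hfind
  | cons x xs =>
    rw [hflt] at hfind
    simp at hfind
    simp [hfind]
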